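-- pv_equiv track=rewrite | github.com/sun-hainan/Python | 差异理论/word_level_diff.py | compute_inline_word_diff
-- ===== SOURCE A (Python) =====
-- def compute_inline_word_diff(words_a, words_b):
--
--     """
--
--     计算行内单词差异（用于一行内的单词比较）
--
--
--
--     参数:
--
--         words_a: 原始单词列表
--
--         words_b: 新单词列表
--
--
--
--     返回:
--
--         差异操作列表
--
--     """
--
--     n = len(words_a)
--
--     m = len(words_b)
--
--
--
--     dp = [[0] * (m + 1) for _ in range(n + 1)]
--
--
--
--     for i in range(1, n + 1):
--
--         for j in range(1, m + 1):
--
--             if words_a[i - 1] == words_b[j - 1]: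
--
--                 dp[i][j] = dp[i - 1][j - 1] + 1
--
--             else:
--
--                 dp[i][j] = max(dp[i - 1][j], dp[i][j - 1])
--
--
--
--     operations = []
--
--     i = n
--
--     j = m
--
--
--
--     while i > 0 or j > 0:
--
--         if i > 0 and j > 0 and words_a[i - 1] == words_b[j - 1]:
--
--             operations.append(('equal', words_a[i - 1]))
--
--             i -= 1
--
--             j -= 1
--
--         elif j > 0 and (i == 0 or dp[i][j - 1] >= dp[i - 1][j]):
--
--             operations.append(('insert', words_b[j - 1]))
--
--             j -= 1
--
--         else:
--
--             operations.append(('delete', words_a[i - 1]))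
--
--             i -= 1
--
--
--
--     operations.reverse()
--
--     return operations
-- ===== SOURCE B (Python) =====
-- def compute_inline_word_diff(words_a, words_b):
--     """Word-level diff via top-down memoized LCS (same tie-breaking as the tabulated version)."""
--     memo = {}
--
--     def lcs(i, j):
--         if i == 0 or j == 0:
--             return 0
--         key = (i, j)
--         if key in memo:
--             return memo[key]
--         if words_a[i - 1] == words_b[j - 1]:
--             res = lcs(i - 1, j - 1) + 1
--         else:
--             res = max(lcs(i - 1, j), lcs(i, j - 1))
--         memo[key] = res
--         return res
--
--     operations = []
--     i = len(words_a)
--     j = len(words_b)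
--     while i > 0 or j > 0:
--         if i > 0 and j > 0 and words_a[i - 1] == words_b[j - 1]:
--             operations.append(('equal', words_a[i - 1]))
--             i -= 1
--             j -= 1
--         elif j > 0 and (i == 0 or lcs(i, j - 1) >= lcs(i - 1, j)):
--             operations.append(('insert', words_b[j - 1]))
--             j -= 1
--         else:
--             operations.append(('delete', words_a[i - 1]))
--             i -= 1
--     operations.reverse()
--     return operations
-- ===== Notes on version B (the rewrite author's own statement) =====
-- stated objective: alternative
-- what changed: Replaced the bottom-up O(n*m) DP table fill with a top-down recursive memoized LCS function; the backtracking queries the memoized recursion instead of reading a precomputed table, with identical tie-breaking.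
import Mathlib
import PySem

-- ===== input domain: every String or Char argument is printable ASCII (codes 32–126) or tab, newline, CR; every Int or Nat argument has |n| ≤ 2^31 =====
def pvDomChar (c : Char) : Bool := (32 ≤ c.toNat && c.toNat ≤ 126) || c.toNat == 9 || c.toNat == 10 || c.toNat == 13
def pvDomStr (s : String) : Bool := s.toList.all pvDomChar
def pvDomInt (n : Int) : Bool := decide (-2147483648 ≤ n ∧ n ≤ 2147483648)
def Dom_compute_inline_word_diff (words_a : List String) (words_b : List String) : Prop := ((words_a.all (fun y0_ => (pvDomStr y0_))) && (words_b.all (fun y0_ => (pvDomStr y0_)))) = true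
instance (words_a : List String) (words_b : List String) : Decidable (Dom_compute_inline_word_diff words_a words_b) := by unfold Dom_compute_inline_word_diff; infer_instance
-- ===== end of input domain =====

-- B replaces A's bottom-up DP table fill with a top-down recursive (memoized in Python) LCS
-- with the same recurrence and tie-breaking; same return value, no speed claim.

-- ===== PORT A =====
-- inner loop "for j in range(1, m+1)": row index i0 = i-1 (0-based), writes dp[i0+1][j0+1]
def pvFillRow (words_a : List String) (words_b : List String) (dp : List (List Nat)) (i0 : Nat) : List (List Nat) :=
  (List.range words_b.length).foldl (fun dp j0 =>
    dp.set (i0 + 1) ((dp.getD (i0 + 1) []).set (j0 + 1)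
      (if words_a.getD i0 "" = words_b.getD j0 "" then (dp.getD i0 []).getD j0 0 + 1
       else max ((dp.getD i0 []).getD (j0 + 1) 0) ((dp.getD (i0 + 1) []).getD j0 0)))) dp

-- the filled table dp
def pvDp (words_a : List String) (words_b : List String) : List (List Nat) :=
  (List.range words_a.length).foldl (pvFillRow words_a words_b)
    (List.replicate (words_a.length + 1) (List.replicate (words_b.length + 1) 0))

-- the "while i > 0 or j > 0" backtracking loop; ops are accumulated in append order and reversed by the caller
def pvBackA (words_a : List String) (words_b : List String) (dp : List (List Nat)) (i j : Nat) : List (String × String) :=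
  if h0 : i = 0 ∧ j = 0 then []
  else if h1 : 0 < i ∧ 0 < j ∧ words_a.getD (i - 1) "" = words_b.getD (j - 1) "" then
    ("equal", words_a.getD (i - 1) "") :: pvBackA words_a words_b dp (i - 1) (j - 1)
  else if h2 : 0 < j ∧ (i = 0 ∨ (dp.getD i []).getD (j - 1) 0 ≥ (dp.getD (i - 1) []).getD j 0) then
    ("insert", words_b.getD (j - 1) "") :: pvBackA words_a words_b dp i (j - 1)
  else
    ("delete", words_a.getD (i - 1) "") :: pvBackA words_a words_b dp (i - 1) j
termination_by i + j
decreasing_by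
  · omega
  · omega
  · have hi : 0 < i := by
      rcases Nat.eq_zero_or_pos i with hz | hp
      · exfalso
        rcases Nat.eq_zero_or_pos j with jz | jp
        · exact h0 ⟨hz, jz⟩
        · exact h2 ⟨jp, Or.inl hz⟩
      · exact hp
    omega

def compute_inline_word_diff (words_a : List String) (words_b : List String) : List (String × String) :=
  (pvBackA words_a words_b (pvDp words_a words_b) words_a.length words_b.length).reverse

-- ===== PORT B =====
-- top-down LCS recursion (B's memo is a pure cache, so the recursion is ported directly)
def pvLcs (words_a : List String) (words_b : List String) : Nat → Nat → Nat
  | 0, _ => 0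
  | _ + 1, 0 => 0
  | i0 + 1, j0 + 1 =>
    if words_a.getD i0 "" = words_b.getD j0 "" then
      pvLcs words_a words_b i0 j0 + 1
    else
      max (pvLcs words_a words_b i0 (j0 + 1)) (pvLcs words_a words_b (i0 + 1) j0)
termination_by i j => i + j

-- B's backtracking loop: identical decisions, but queried from pvLcs instead of a table
def pvBackB (words_a : List String) (words_b : List String) (i j : Nat) : List (String × String) :=
  if h0 : i = 0 ∧ j = 0 then []
  else if h1 : 0 < i ∧ 0 < j ∧ words_a.getD (i - 1) "" = words_b.getD (j - 1) "" then
    ("equal", words_a.getD (i - 1) "") :: pvBackB words_a words_b (i - 1) (j - 1)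
  else if h2 : 0 < j ∧ (i = 0 ∨ pvLcs words_a words_b i (j - 1) ≥ pvLcs words_a words_b (i - 1) j) then
    ("insert", words_b.getD (j - 1) "") :: pvBackB words_a words_b i (j - 1)
  else
    ("delete", words_a.getD (i - 1) "") :: pvBackB words_a words_b (i - 1) j
termination_by i + j
decreasing_by
  · omega
  · omega
  · have hi : 0 < i := by
      rcases Nat.eq_zero_or_pos i with hz | hp
      · exfalso
        rcases Nat.eq_zero_or_pos j with jz | jp
        · exact h0 ⟨hz, jz⟩
        · exact h2 ⟨jp, Or.inl hz⟩
      · exact hp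
    omega

def compute_inline_word_diff_alt (words_a : List String) (words_b : List String) : List (String × String) :=
  (pvBackB words_a words_b words_a.length words_b.length).reverse

-- ===== PRECONDITION & SPEC =====
def Spec_compute_inline_word_diff (words_a : List String) (words_b : List String) (out : List (String × String)) : Prop := out = compute_inline_word_diff_alt words_a words_b
instance (words_a : List String) (words_b : List String) (out : List (String × String)) : Decidable (Spec_compute_inline_word_diff words_a words_b out) := by unfold Spec_compute_inline_word_diff; infer_instance

-- ===== CLAIM (what is proved, stated in full; the proofs are below) =====
def Claim_equal_compute_inline_word_diff : Prop := ∀ (words_a : List String) (words_b : List String), Dom_compute_inline_word_diff words_a words_b → Spec_compute_inline_word_diff words_a words_b (compute_inline_word_diff words_a words_b)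

-- ===== LEMMAS AND PROOFS =====

theorem pv_getD_set_self {α : Type} (l : List α) (i : Nat) (x d : α) (h : i < l.length) :
    (l.set i x).getD i d = x := by
  simp [List.getD, List.getElem?_set_self h]

theorem pv_getD_set_ne {α : Type} (l : List α) (i i' : Nat) (x d : α) (h : i ≠ i') :
    (l.set i x).getD i' d = l.getD i' d := by
  simp [List.getD, List.getElem?_set_ne h]

theorem pv_getD_replicate {α : Type} (n i : Nat) (a d : α) (h : i < n) :
    (List.replicate n a).getD i d = a := by
  simp [List.getD, h]

theorem pvLcs_zero_left (a b : List String) (j : Nat) : pvLcs a b 0 j = 0 := by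
  cases j <;> simp [pvLcs]

theorem pvLcs_zero_right (a b : List String) (i : Nat) : pvLcs a b i 0 = 0 := by
  cases i <;> simp [pvLcs]

-- invariant of the table states: rows covered so far carry pvLcs values, later rows are zero
def pvTab (a b : List String) (dp : List (List Nat)) (k : Nat) : Prop :=
  dp.length = a.length + 1 ∧ (∀ r ∈ dp, r.length = b.length + 1) ∧
    ∀ i j : Nat, i ≤ a.length → j ≤ b.length →
      (dp.getD i []).getD j 0 = if i ≤ k then pvLcs a b i j else 0

theorem pvTab_init (a b : List String) :
    pvTab a b (List.replicate (a.length + 1) (List.replicate (b.length + 1) 0)) 0 := by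
  refine ⟨by simp, by intro r hr; simp_all [List.eq_of_mem_replicate hr], ?_⟩
  intro i j hi hj
  rw [pv_getD_replicate _ _ _ _ (by omega), pv_getD_replicate _ _ _ _ (by omega)]
  rcases Nat.eq_zero_or_pos i with hz | hp
  · subst hz; simp [pvLcs_zero_left]
  · simp [show ¬ i ≤ 0 by omega]

-- one inner step: after folding j0 over range t, row k+1 is correct up to column t
def pvTabIn (a b : List String) (k : Nat) (dp : List (List Nat)) (t : Nat) : Prop :=
  dp.length = a.length + 1 ∧ (∀ r ∈ dp, r.length = b.length + 1) ∧
    ∀ i j : Nat, i ≤ a.length → j ≤ b.length →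
      (dp.getD i []).getD j 0 =
        if i ≤ k ∨ (i = k + 1 ∧ j ≤ t) then pvLcs a b i j else 0

theorem pvTabIn_step (a b : List String) (k t : Nat) (hk : k < a.length) (ht : t < b.length)
    (dp : List (List Nat)) (h : pvTabIn a b k dp t) :
    pvTabIn a b k
      (dp.set (k + 1) ((dp.getD (k + 1) []).set (t + 1)
        (if a.getD k "" = b.getD t "" then (dp.getD k []).getD t 0 + 1
         else max ((dp.getD k []).getD (t + 1) 0) ((dp.getD (k + 1) []).getD t 0)))) (t + 1) := by
  obtain ⟨hlen, hrow, hval⟩ := h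
  have hrowlen : (dp.getD (k + 1) []).length = b.length + 1 := by
    have hlt : k + 1 < dp.length := by omega
    have hmem : dp.getD (k + 1) [] ∈ dp := by
      simp only [List.getD, List.getElem?_eq_getElem hlt, Option.getD_some]
      exact List.getElem_mem _
    exact hrow _ hmem
  refine ⟨by simp [hlen], ?_, ?_⟩
  · intro r hr
    rcases List.mem_or_eq_of_mem_set hr with hm | he
    · exact hrow _ hm
    · subst he; simp only [List.length_set]; exact hrowlen
  · intro i j hi hj
    -- value written at (k+1, t+1)
    have hv : (if a.getD k "" = b.getD t "" then (dp.getD k []).getD t 0 + 1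
         else max ((dp.getD k []).getD (t + 1) 0) ((dp.getD (k + 1) []).getD t 0))
        = pvLcs a b (k + 1) (t + 1) := by
      have e1 : (dp.getD k []).getD t 0 = pvLcs a b k t := by
        rw [hval k t (by omega) (by omega)]; simp
      have e2 : (dp.getD k []).getD (t + 1) 0 = pvLcs a b k (t + 1) := by
        rw [hval k (t + 1) (by omega) (by omega)]; simp
      have e3 : (dp.getD (k + 1) []).getD t 0 = pvLcs a b (k + 1) t := by
        rw [hval (k + 1) t (by omega) (by omega)]; simp
      rw [e1, e2, e3,
        show pvLcs a b (k+1) (t+1) = if a.getD k "" = b.getD t "" then pvLcs a b k t + 1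
            else max (pvLcs a b k (t+1)) (pvLcs a b (k+1) t) from by rw [pvLcs]]
    by_cases hik : i = k + 1
    · subst hik
      rw [pv_getD_set_self _ _ _ _ (by omega)]
      by_cases hjt : j = t + 1
      · subst hjt
        rw [pv_getD_set_self _ _ _ _ (by omega), hv]
        simp
      · rw [pv_getD_set_ne _ _ _ _ _ (by omega), hval _ _ (by omega) hj]
        by_cases hjle : j ≤ t
        · simp [hjle, show j ≤ t + 1 by omega, show ¬ k + 1 ≤ k by omega]
        · simp [hjle, show ¬ j ≤ t + 1 by omega, show ¬ k + 1 ≤ k by omega]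
    · rw [pv_getD_set_ne _ _ _ _ _ (by omega), hval _ _ hi hj]
      by_cases hle : i ≤ k
      · simp [hle]
      · simp [hle, hik]

theorem pvTabIn_fold (a b : List String) (k : Nat) (hk : k < a.length)
    (dp : List (List Nat)) (h : pvTabIn a b k dp 0) (t : Nat) (ht : t ≤ b.length) :
    pvTabIn a b k
      ((List.range t).foldl (fun dp j0 =>
        dp.set (k + 1) ((dp.getD (k + 1) []).set (j0 + 1)
          (if a.getD k "" = b.getD j0 "" then (dp.getD k []).getD j0 0 + 1
           else max ((dp.getD k []).getD (j0 + 1) 0) ((dp.getD (k + 1) []).getD j0 0)))) dp) t := by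
  induction t with
  | zero => simpa using h
  | succ t ih =>
    rw [List.range_succ, List.foldl_append, List.foldl_cons, List.foldl_nil]
    exact pvTabIn_step a b k t hk (by omega) _ (ih (by omega))

theorem pvFillRow_tab (a b : List String) (k : Nat) (hk : k < a.length)
    (dp : List (List Nat)) (h : pvTab a b dp k) :
    pvTab a b (pvFillRow a b dp k) (k + 1) := by
  obtain ⟨hlen, hrow, hval⟩ := h
  have h0 : pvTabIn a b k dp 0 := by
    refine ⟨hlen, hrow, ?_⟩
    intro i j hi hj
    rw [hval i j hi hj]
    by_cases hle : i ≤ k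
    · simp [hle]
    · by_cases hik : i = k + 1
      · subst hik
        rcases Nat.eq_zero_or_pos j with hz | hp
        · subst hz; simp [pvLcs_zero_right, hle]
        · simp [hle, show ¬ j ≤ 0 by omega]
      · simp [hle, hik]
  obtain ⟨l1, l2, l3⟩ := pvTabIn_fold a b k hk dp h0 b.length le_rfl
  unfold pvFillRow
  refine ⟨l1, l2, ?_⟩
  intro i j hi hj
  rw [l3 i j hi hj]
  by_cases hle : i ≤ k + 1
  · by_cases hk' : i ≤ k
    · simp [hk', hle]
    · have : i = k + 1 := by omega
      simp [this, hj]
  · simp [hle, show ¬ i ≤ k by omega, show ¬ i = k + 1 by omega]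

theorem pvDp_tab (a b : List String) (k : Nat) (hk : k ≤ a.length) :
    pvTab a b ((List.range k).foldl (pvFillRow a b)
      (List.replicate (a.length + 1) (List.replicate (b.length + 1) 0))) k := by
  induction k with
  | zero => simpa using pvTab_init a b
  | succ k ih =>
    rw [List.range_succ, List.foldl_append, List.foldl_cons, List.foldl_nil]
    exact pvFillRow_tab a b k (by omega) _ (ih (by omega))

theorem pvDp_eq (a b : List String) (i j : Nat) (hi : i ≤ a.length) (hj : j ≤ b.length) :
    ((pvDp a b).getD i []).getD j 0 = pvLcs a b i j := by
  have h := (pvDp_tab a b a.length le_rfl).2.2 i j hi hj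
  rw [pvDp, h, if_pos hi]

theorem pvBack_eq (a b : List String) (N : Nat) :
    ∀ i j : Nat, i + j ≤ N → i ≤ a.length → j ≤ b.length →
      pvBackA a b (pvDp a b) i j = pvBackB a b i j := by
  induction N with
  | zero =>
    intro i j hN hi hj
    have : i = 0 ∧ j = 0 := by omega
    rw [pvBackA, pvBackB]
    simp [this]
  | succ N ih =>
    intro i j hN hi hj
    rw [pvBackA, pvBackB]
    by_cases h0 : i = 0 ∧ j = 0
    · simp [h0]
    · rw [dif_neg h0, dif_neg h0]
      by_cases h1 : 0 < i ∧ 0 < j ∧ a.getD (i - 1) "" = b.getD (j - 1) ""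
      · rw [dif_pos h1, dif_pos h1, ih (i - 1) (j - 1) (by omega) (by omega) (by omega)]
      · rw [dif_neg h1, dif_neg h1]
        have hc : (0 < j ∧ (i = 0 ∨ ((pvDp a b).getD i []).getD (j - 1) 0 ≥ ((pvDp a b).getD (i - 1) []).getD j 0))
            ↔ (0 < j ∧ (i = 0 ∨ pvLcs a b i (j - 1) ≥ pvLcs a b (i - 1) j)) := by
          rw [pvDp_eq a b i (j - 1) hi (by omega), pvDp_eq a b (i - 1) j (by omega) hj]
        by_cases h2 : 0 < j ∧ (i = 0 ∨ pvLcs a b i (j - 1) ≥ pvLcs a b (i - 1) j)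
        · rw [dif_pos (hc.mpr h2), dif_pos h2]
          rw [ih i (j - 1) (by omega) hi (by omega)]
        · rw [dif_neg (fun h => h2 (hc.mp h)), dif_neg h2]
          have hipos : 0 < i := by
            rcases Nat.eq_zero_or_pos i with hz | hp
            · exfalso
              rcases Nat.eq_zero_or_pos j with jz | jp
              · exact h0 ⟨hz, jz⟩
              · exact h2 ⟨jp, Or.inl hz⟩
            · exact hp
          rw [ih (i - 1) j (by omega) (by omega) hj]

-- ===== VERDICT (by name: the statement is the Claim_ definition above) =====
theorem compute_inline_word_diff_spec : Claim_equal_compute_inline_word_diff := by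
  intro words_a words_b _
  unfold Spec_compute_inline_word_diff compute_inline_word_diff compute_inline_word_diff_alt
  rw [pvBack_eq words_a words_b (words_a.length + words_b.length) _ _ le_rfl le_rfl le_rfl]
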